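-- pv_equiv track=rewrite | github.com/SupaEagle/LizClaw | memory/synthesize.py | extract_entries
-- ===== SOURCE A (Python) =====
-- from typing import Dict, List, Any, Optional
--
-- def extract_entries(content: str) -> Dict[str, List[str]]:
--     """Extract categorized entries from daily notes."""
--     entries = {
--         "decisions": [],
--         "tasks": [],
--         "events": [],
--         "insights": [],
--         "notes": []
--     }
--
--     lines = content.split("\n")
--     current_section = None
--     current_content = []
--
--     for line in lines:
--         if "## [" in line and "]" in line:
--             # Save previous section
--             if current_section and current_content:
--                 entry_text = "\n".join(current_content).strip()
--                 if current_section in entries: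
--                     entries[current_section].append(entry_text)
--
--             # Determine new section type
--             if "Decision" in line:
--                 current_section = "decisions"
--             elif "Task" in line:
--                 current_section = "tasks"
--             elif "Event" in line:
--                 current_section = "events"
--             elif "Insight" in line:
--                 current_section = "insights"
--             else:
--                 current_section = "notes"
--
--             current_content = [line]
--         elif current_section:
--             current_content.append(line)
--
--     # Don't forget last section
--     if current_section and current_content:
--         entry_text = "\n".join(current_content).strip()
--         if current_section in entries:
--             entries[current_section].append(entry_text)
--
--     return entries
-- ===== SOURCE B (Python) =====
-- def extract_entries(content: str):
--     """Extract categorized entries from daily notes (two-phase: segment, then classify)."""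
--     lines = content.split("\n")
--     segments = []
--     for line in lines:
--         if "## [" in line and "]" in line:
--             segments.append([line])
--         elif segments:
--             segments[-1].append(line)
--     entries = {
--         "decisions": [],
--         "tasks": [],
--         "events": [],
--         "insights": [],
--         "notes": []
--     }
--     for seg in segments:
--         header = seg[0]
--         if "Decision" in header:
--             key = "decisions"
--         elif "Task" in header:
--             key = "tasks"
--         elif "Event" in header:
--             key = "events"
--         elif "Insight" in header:
--             key = "insights"
--         else:
--             key = "notes"
--         entries[key].append("\n".join(seg).strip())
--     return entries
-- ===== Notes on version B (the rewrite author's own statement) =====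
-- stated objective: alternative
-- what changed: Replaces A's single-pass streaming accumulator (current_section/current_content with duplicated end-of-section flush logic) by two phases: one pass grouping lines into header-started segments, then a pass that classifies each segment's header and appends the joined, stripped segment text.
import Mathlib
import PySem

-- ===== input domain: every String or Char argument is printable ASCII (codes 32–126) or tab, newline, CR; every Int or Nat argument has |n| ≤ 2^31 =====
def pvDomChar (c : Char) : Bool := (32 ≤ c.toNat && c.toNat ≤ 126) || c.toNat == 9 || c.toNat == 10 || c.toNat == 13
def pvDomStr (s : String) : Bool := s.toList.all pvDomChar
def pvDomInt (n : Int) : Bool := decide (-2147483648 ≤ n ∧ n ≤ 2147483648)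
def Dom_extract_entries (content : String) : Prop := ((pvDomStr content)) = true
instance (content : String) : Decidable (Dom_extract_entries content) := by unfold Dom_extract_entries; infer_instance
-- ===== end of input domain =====

-- B replaces A's streaming accumulator (current_section/current_content with an end-of-loop flush)
-- by two phases: first group the lines into header-started segments, then classify and join each
-- segment; objective: alternative decomposition, same cost.

-- shared helpers: both Pythons contain these exact tests literally
def pvIsHdr (l : String) : Bool := PySem.Str.isIn "## [" l && PySem.Str.isIn "]" l

def pvClassify (l : String) : String :=
  if PySem.Str.isIn "Decision" l then "decisions"
  else if PySem.Str.isIn "Task" l then "tasks"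
  else if PySem.Str.isIn "Event" l then "events"
  else if PySem.Str.isIn "Insight" l then "insights"
  else "notes"

def pvInit : PySem.Dict String (List String) :=
  PySem.Dict.ofList [("decisions", []), ("tasks", []), ("events", []), ("insights", []), ("notes", [])]

-- ===== PORT A =====
-- the two identical flush blocks ('if current_section and current_content: …')
def extractFlush (d : PySem.Dict String (List String)) (sec : Option String) (cur : List String) :
    PySem.Dict String (List String) :=
  match sec with
  | none => d
  | some s =>
    if cur.isEmpty then d
    else if d.contains s then d.modify s [] (fun v => v ++ [PySem.Str.strip (PySem.Str.join "\n" cur)])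
    else d

-- the 'for line in lines' loop with state (entries, current_section, current_content), plus the final flush
def extractLoop : List String → PySem.Dict String (List String) → Option String → List String →
    PySem.Dict String (List String)
  | [], d, sec, cur => extractFlush d sec cur
  | l :: rest, d, sec, cur =>
    if pvIsHdr l then
      extractLoop rest (extractFlush d sec cur) (some (pvClassify l)) [l]
    else
      match sec with
      | some _ => extractLoop rest d sec (cur ++ [l])
      | none => extractLoop rest d sec cur

def extract_entries (content : String) : List (String × List String) :=
  (extractLoop ((PySem.Str.split? content "\n").getD []) pvInit none []).items

-- ===== PORT B =====
-- first pass: group lines into segments, each starting at a header line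
def segsLoop : List String → List (List String) → List (List String)
  | [], segs => segs
  | l :: rest, segs =>
    if pvIsHdr l then segsLoop rest (segs ++ [[l]])
    else if segs.isEmpty then segsLoop rest segs
    else segsLoop rest (segs.dropLast ++ [segs.getLast! ++ [l]])

-- second pass body: classify seg[0] and append the joined, stripped segment
-- (seg[0]: every segment is nonempty by construction, so pyGetD's default is never used)
def segStep (d : PySem.Dict String (List String)) (seg : List String) :
    PySem.Dict String (List String) :=
  d.modify (pvClassify (PySem.List.pyGetD seg 0 "")) []
    (fun v => v ++ [PySem.Str.strip (PySem.Str.join "\n" seg)])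

def extract_entries_alt (content : String) : List (String × List String) :=
  ((segsLoop ((PySem.Str.split? content "\n").getD []) []).foldl segStep pvInit).items

-- ===== PRECONDITION & SPEC =====
def Spec_extract_entries (content : String) (out : List (String × List String)) : Prop := out = extract_entries_alt content
instance (content : String) (out : List (String × List String)) : Decidable (Spec_extract_entries content out) := by unfold Spec_extract_entries; infer_instance

-- ===== CLAIM (what is proved, stated in full; the proofs are below) =====
def Claim_equal_extract_entries : Prop := ∀ (content : String), Dom_extract_entries content → Spec_extract_entries content (extract_entries content)

-- ===== LEMMAS AND PROOFS =====

-- every key pvClassify produces is a key of any dict that, like pvInit, contains the five keys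
def pvHasKeys (d : PySem.Dict String (List String)) : Prop := ∀ l, d.contains (pvClassify l) = true

theorem pvHasKeys_init : pvHasKeys pvInit := by
  intro l
  unfold pvClassify
  split_ifs <;> decide

theorem pvHasKeys_segStep (d : PySem.Dict String (List String)) (seg : List String)
    (h : pvHasKeys d) : pvHasKeys (segStep d seg) := by
  intro l
  unfold segStep
  rw [PySem.Dict.contains_modify]
  simp [h l]

-- segsLoop only ever touches the last segment: a nonempty prefix splits off
theorem segsLoop_append (rest : List String) : ∀ (s0 ss : List (List String)) (c : List String),
    segsLoop rest (s0 ++ ss ++ [c]) = s0 ++ segsLoop rest (ss ++ [c]) := by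
  induction rest with
  | nil => intro s0 ss c; simp [segsLoop]
  | cons l rest ih =>
    intro s0 ss c
    by_cases hl : pvIsHdr l = true
    · have h1 : s0 ++ ss ++ [c] ++ [[l]] = s0 ++ (ss ++ [c]) ++ [[l]] := by simp
      have h2 : ss ++ [c] ++ [[l]] = ([] : List (List String)) ++ (ss ++ [c]) ++ [[l]] := by simp
      simp only [segsLoop, hl, if_pos]
      rw [h1, ih s0 (ss ++ [c]) [l], h2, ih [] (ss ++ [c]) [l]]
    · have hne : (s0 ++ ss ++ [c]).isEmpty = false := by simp
      have hne2 : (ss ++ [c]).isEmpty = false := by simp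
      have hd1 : (s0 ++ ss ++ [c]).dropLast = s0 ++ ss := by
        rw [List.append_assoc, ← List.append_assoc s0, List.dropLast_concat]
      have hg1 : (s0 ++ ss ++ [c]).getLast! = c := by
        rw [List.append_assoc, ← List.append_assoc s0]
        simp [List.getLast!_eq_getLast?_getD]
      have hd2 : (ss ++ [c]).dropLast = ss := List.dropLast_concat
      have hg2 : (ss ++ [c]).getLast! = c := by
        simp [List.getLast!_eq_getLast?_getD]
      simp only [segsLoop, hl, Bool.false_eq_true, hne, hne2, if_false,
        hd1, hg1, hd2, hg2]
      exact ih s0 ss (c ++ [l])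

-- main invariant while inside a section: A's stream with current segment (h :: t)
-- equals B's second pass over the remaining segments, folded into the same dict
theorem loop_inside (rest : List String) : ∀ (d : PySem.Dict String (List String))
    (h : String) (t : List String), pvHasKeys d →
    extractLoop rest d (some (pvClassify h)) (h :: t) =
      (segsLoop rest [h :: t]).foldl segStep d := by
  induction rest with
  | nil =>
    intro d h t hk
    simp only [extractLoop, extractFlush, segsLoop, List.foldl, segStep,
      List.isEmpty_cons, Bool.false_eq_true, if_false, hk h, if_pos]
    simp [PySem.List.pyGetD]
  | cons l rest ih =>
    intro d h t hk
    by_cases hl : pvIsHdr l = true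
    · have hflush : extractFlush d (some (pvClassify h)) (h :: t) = segStep d (h :: t) := by
        simp only [extractFlush, segStep, List.isEmpty_cons, Bool.false_eq_true, if_false,
          hk h, if_pos]
        simp [PySem.List.pyGetD]
      have hseg : segsLoop rest ([h :: t] ++ [[l]]) = [h :: t] ++ segsLoop rest [[l]] := by
        have := segsLoop_append rest [h :: t] [] [l]
        simpa using this
      simp only [segsLoop, extractLoop, hl, if_pos, hflush]
      rw [ih (segStep d (h :: t)) l [] (pvHasKeys_segStep d (h :: t) hk), hseg]
      simp
    · have := ih d h (t ++ [l]) hk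
      simp only [extractLoop, segsLoop, hl, Bool.false_eq_true, if_false,
        List.isEmpty_cons, List.dropLast_singleton, List.getLast!_eq_getLast?_getD,
        List.getLast?_singleton, Option.getD_some, List.nil_append]
      rw [show (h :: t) ++ [l] = h :: (t ++ [l]) by simp]
      exact this

-- before the first header both sides skip lines
theorem loop_outside (rest : List String) : ∀ (d : PySem.Dict String (List String)),
    pvHasKeys d → extractLoop rest d none [] = (segsLoop rest []).foldl segStep d := by
  induction rest with
  | nil => intro d _; simp [extractLoop, extractFlush, segsLoop]
  | cons l rest ih =>
    intro d hk
    by_cases hl : pvIsHdr l = true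
    · simp only [extractLoop, segsLoop, hl, if_pos, extractFlush, List.nil_append]
      exact loop_inside rest d l [] hk
    · simp only [extractLoop, segsLoop, hl, Bool.false_eq_true, if_false, List.isEmpty_nil,
        if_true]
      exact ih d hk

-- ===== VERDICT (by name: the statement is the Claim_ definition above) =====
theorem extract_entries_spec : Claim_equal_extract_entries := by
  intro content _
  unfold Spec_extract_entries extract_entries extract_entries_alt
  rw [loop_outside ((PySem.Str.split? content "\n").getD []) pvInit pvHasKeys_init]
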